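-- pv_equiv track=rewrite | github.com/StDario/lmu-munich-wmt19 | sockeye/data_io.py | define_ctx_buckets
-- ===== SOURCE A (Python) =====
-- from typing import Any, cast, Dict, Iterator, Iterable, List, Optional, Sequence, Sized, Tuple, Set
--
-- def define_ctx_buckets(max_seq_len: int, step=10, ctx_max_seq_len=None, ctx_step=None) -> List[Tuple]:
--
--     if ctx_max_seq_len is None:
--         ctx_max_seq_len = max_seq_len
--
--     if ctx_step is None:
--         ctx_step = step
--
--
--     source_buckets = [bucket_len for bucket_len in range(step, max_seq_len + step, step)]
--     ctx_source_buckets = [bucket_len for bucket_len in range(ctx_step, ctx_max_seq_len + ctx_step, ctx_step)]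
--
--     source_buckets[-1] = max_seq_len
--     ctx_source_buckets[-1] = ctx_max_seq_len
--
--     if len(ctx_source_buckets) < len(source_buckets):
--         ctx_source_buckets += [ctx_source_buckets[-1] for _ in range(len(source_buckets) - len(ctx_source_buckets))]
--
--     if len(source_buckets) < len(ctx_source_buckets):
--         source_buckets += [source_buckets[-1] for _ in range(len(ctx_source_buckets) - len(source_buckets))]
--
--     buckets = list(zip(source_buckets, ctx_source_buckets))
--
--     return buckets
-- ===== SOURCE B (Python) =====
-- def define_ctx_buckets(max_seq_len, step=10, ctx_max_seq_len=None, ctx_step=None):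
--     if ctx_max_seq_len is None:
--         ctx_max_seq_len = max_seq_len
--     if ctx_step is None:
--         ctx_step = step
--     # bucket counts by ceiling division (valid for the ascending positive-step
--     # and the descending negative-step case alike); no lists are built or padded
--     ns = -((-max_seq_len) // step)
--     nc = -((-ctx_max_seq_len) // ctx_step)
--     return [(i * step if i < ns else max_seq_len,
--              i * ctx_step if i < nc else ctx_max_seq_len)
--             for i in range(1, max(ns, nc) + 1)]
-- ===== Notes on version B (the rewrite author's own statement) =====
-- stated objective: alternative
-- what changed: B never materializes the two range lists or pads the shorter one: it computes each side's bucket count by ceiling division (-(-L//step)) and emits each pair directly by index arithmetic (i*step below the count, the max length at and beyond it) in a single loop.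
import Mathlib
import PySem

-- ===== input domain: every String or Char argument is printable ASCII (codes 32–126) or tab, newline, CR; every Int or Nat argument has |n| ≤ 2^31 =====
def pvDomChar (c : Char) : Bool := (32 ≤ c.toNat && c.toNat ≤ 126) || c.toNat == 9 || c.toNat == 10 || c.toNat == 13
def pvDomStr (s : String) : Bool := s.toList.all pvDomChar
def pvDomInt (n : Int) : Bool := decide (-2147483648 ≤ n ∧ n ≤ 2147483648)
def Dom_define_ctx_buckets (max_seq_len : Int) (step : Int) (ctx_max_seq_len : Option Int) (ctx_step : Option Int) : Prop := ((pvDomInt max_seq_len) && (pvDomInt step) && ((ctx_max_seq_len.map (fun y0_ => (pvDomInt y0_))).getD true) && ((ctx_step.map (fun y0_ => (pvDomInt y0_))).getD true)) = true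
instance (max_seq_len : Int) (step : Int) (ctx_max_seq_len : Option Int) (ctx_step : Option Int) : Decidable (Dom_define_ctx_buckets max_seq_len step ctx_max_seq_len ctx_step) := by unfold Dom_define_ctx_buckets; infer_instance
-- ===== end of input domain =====

-- B computes each side's bucket count by ceiling division and emits each pair by index
-- arithmetic in one comprehension, never building or padding the range lists (objective: alternative).

-- ===== PORT A =====
def define_ctx_buckets (max_seq_len : Int) (step : Int) (ctx_max_seq_len : Option Int) (ctx_step : Option Int) : List (Int × Int) :=
  let cmsl := ctx_max_seq_len.getD max_seq_len
  let cstep := ctx_step.getD step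
  let sb0 := PySem.List.pyRange step (max_seq_len + step) step
  let cb0 := PySem.List.pyRange cstep (cmsl + cstep) cstep
  -- 'xs[-1] = v'; the IndexError on an empty list is excluded by Pre_
  let sb := sb0.dropLast ++ [max_seq_len]
  let cb := cb0.dropLast ++ [cmsl]
  -- 'ctx_source_buckets[-1]' inside the padding comprehension: last element (list nonempty under Pre_)
  let cb2 := if cb.length < sb.length then cb ++ (List.range (sb.length - cb.length)).map (fun _ => cb.getLastD 0) else cb
  let sb2 := if sb.length < cb2.length then sb ++ (List.range (cb2.length - sb.length)).map (fun _ => sb.getLastD 0) else sb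
  sb2.zip cb2

-- ===== PORT B =====
def define_ctx_buckets_alt (max_seq_len : Int) (step : Int) (ctx_max_seq_len : Option Int) (ctx_step : Option Int) : List (Int × Int) :=
  let cmsl := ctx_max_seq_len.getD max_seq_len
  let cstep := ctx_step.getD step
  let ns := -(PySem.Int.floordiv (-max_seq_len) step)
  let nc := -(PySem.Int.floordiv (-cmsl) cstep)
  (PySem.List.pyRange 1 (max ns nc + 1) 1).map
    (fun i => ((if i < ns then i * step else max_seq_len),
               (if i < nc then i * cstep else cmsl)))

-- ===== PRECONDITION & SPEC =====
-- Pre_ excludes exactly the inputs where Python A raises: step (or resolved ctx_step) = 0 is a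
-- ValueError from range, and an empty bucket range makes 'source_buckets[-1] = ...' an IndexError.
def Pre_define_ctx_buckets (max_seq_len : Int) (step : Int) (ctx_max_seq_len : Option Int) (ctx_step : Option Int) : Prop :=
  ((0 < step ∧ 0 < max_seq_len) ∨ (step < 0 ∧ max_seq_len < 0)) ∧
  ((0 < ctx_step.getD step ∧ 0 < ctx_max_seq_len.getD max_seq_len) ∨
   (ctx_step.getD step < 0 ∧ ctx_max_seq_len.getD max_seq_len < 0))
instance (max_seq_len : Int) (step : Int) (ctx_max_seq_len : Option Int) (ctx_step : Option Int) : Decidable (Pre_define_ctx_buckets max_seq_len step ctx_max_seq_len ctx_step) := by unfold Pre_define_ctx_buckets; infer_instance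

def pvWitness_define_ctx_buckets : Int × Int × Option Int × Option Int := (25, 10, some 7, some 3)

def Spec_define_ctx_buckets (max_seq_len : Int) (step : Int) (ctx_max_seq_len : Option Int) (ctx_step : Option Int) (out : List (Int × Int)) : Prop := out = define_ctx_buckets_alt max_seq_len step ctx_max_seq_len ctx_step
instance (max_seq_len : Int) (step : Int) (ctx_max_seq_len : Option Int) (ctx_step : Option Int) (out : List (Int × Int)) : Decidable (Spec_define_ctx_buckets max_seq_len step ctx_max_seq_len ctx_step out) := by unfold Spec_define_ctx_buckets; infer_instance

-- ===== CLAIM (what is proved, stated in full; the proofs are below) =====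
def Claim_equal_define_ctx_buckets : Prop := ∀ (max_seq_len : Int) (step : Int) (ctx_max_seq_len : Option Int) (ctx_step : Option Int), Dom_define_ctx_buckets max_seq_len step ctx_max_seq_len ctx_step → Pre_define_ctx_buckets max_seq_len step ctx_max_seq_len ctx_step → Spec_define_ctx_buckets max_seq_len step ctx_max_seq_len ctx_step (define_ctx_buckets max_seq_len step ctx_max_seq_len ctx_step)

-- ===== LEMMAS AND PROOFS =====

-- reading a padded list at i < length + k is the clamped read of the original list
lemma padded_getD (xs : List Int) (hx : xs ≠ []) (k i : Nat) (hi : i < xs.length + k) :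
    (xs ++ List.replicate k (xs.getLastD 0)).getD i 0 = xs.getD (min i (xs.length - 1)) 0 := by
  have hlen : 0 < xs.length := List.length_pos_iff.mpr hx
  by_cases h : i < xs.length
  · have : min i (xs.length - 1) = i := by omega
    rw [this, List.getD_append _ _ _ _ h]
  · have hmin : min i (xs.length - 1) = xs.length - 1 := by omega
    rw [hmin]
    have h1 : (xs ++ List.replicate k (xs.getLastD 0)).getD i 0 = xs.getLastD 0 := by
      rw [List.getD_eq_getElem _ _ (by simp; omega)]
      rw [List.getElem_append_right (by omega)]
      simp
    rw [h1, List.getD_eq_getElem _ _ (by omega)]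
    rw [List.getLastD_eq_getLast?, List.getLast?_eq_getElem?]
    simp [List.getElem?_eq_getElem (by omega : xs.length - 1 < xs.length)]

-- loop-shape: pad-the-shorter-then-zip equals a clamped-index comprehension
lemma pad_zip_eq (xs ys : List Int) (hx : xs ≠ []) (hy : ys ≠ []) :
    (let cb2 := if ys.length < xs.length then ys ++ (List.range (xs.length - ys.length)).map (fun _ => ys.getLastD 0) else ys;
     let sb2 := if xs.length < cb2.length then xs ++ (List.range (cb2.length - xs.length)).map (fun _ => xs.getLastD 0) else xs;
     sb2.zip cb2)
    = (List.range (max xs.length ys.length)).map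
        (fun i => (xs.getD (min i (xs.length - 1)) 0, ys.getD (min i (ys.length - 1)) 0)) := by
  set p := xs.length with hp
  set q := ys.length with hq
  set n := max p q with hn
  simp only [List.map_const', List.length_range]
  have hcb2 : (if ys.length < xs.length then ys ++ List.replicate (xs.length - ys.length) (ys.getLastD 0) else ys)
      = ys ++ List.replicate (n - q) (ys.getLastD 0) := by
    split
    · congr 1; congr 1; omega
    · have : n - q = 0 := by omega
      simp [this]
  rw [hcb2]
  have hcb2len : (ys ++ List.replicate (n - q) (ys.getLastD 0)).length = n := by simp; omega
  have hsb2 : (if xs.length < (ys ++ List.replicate (n - q) (ys.getLastD 0)).length then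
        xs ++ List.replicate ((ys ++ List.replicate (n - q) (ys.getLastD 0)).length - xs.length) (xs.getLastD 0) else xs)
      = xs ++ List.replicate (n - p) (xs.getLastD 0) := by
    rw [hcb2len]
    split
    · rfl
    · have : n - p = 0 := by omega
      simp [this]
  rw [hsb2]
  apply List.ext_getElem
  · simp; omega
  · intro i h1 h2
    have hi : i < n := by simpa using h2
    have hiL : i < (xs ++ List.replicate (n - p) (xs.getLastD 0)).length := by simp; omega
    have hiR : i < (ys ++ List.replicate (n - q) (ys.getLastD 0)).length := by simp; omega
    rw [List.getElem_zip]
    rw [List.getElem_map, List.getElem_range]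
    have eL : (xs ++ List.replicate (n - p) (xs.getLastD 0))[i] = xs.getD (min i (p - 1)) 0 := by
      rw [← List.getD_eq_getElem _ 0 hiL]
      exact padded_getD xs hx (n - p) i (by omega)
    have eR : (ys ++ List.replicate (n - q) (ys.getLastD 0))[i] = ys.getD (min i (q - 1)) 0 := by
      rw [← List.getD_eq_getElem _ 0 hiR]
      exact padded_getD ys hy (n - q) i (by omega)
    rw [eL, eR]

-- the resolved bucket count is ≥ 1 and brackets m between (n-1)·s and n·s
lemma ceil_bracket (m s : Int) (h : (0 < s ∧ 0 < m) ∨ (s < 0 ∧ m < 0)) :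
    1 ≤ -(PySem.Int.floordiv (-m) s) ∧
    ((0 < s → ((-(PySem.Int.floordiv (-m) s)) - 1) * s < m ∧ m ≤ (-(PySem.Int.floordiv (-m) s)) * s) ∧
     (s < 0 → (-(PySem.Int.floordiv (-m) s)) * s ≤ m ∧ m < ((-(PySem.Int.floordiv (-m) s)) - 1) * s)) := by
  set n := -(PySem.Int.floordiv (-m) s) with hn
  rcases h with ⟨hs, hm⟩ | ⟨hs, hm⟩
  · have hbr : (n - 1) * s < m ∧ m ≤ n * s :=
      (PySem.Int.neg_floordiv_neg_eq_iff_of_pos hs).mp rfl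
    refine ⟨?_, fun _ => hbr, fun h' => absurd hs (by omega)⟩
    by_contra hc
    have hns : n * s ≤ 0 := by
      have := mul_nonneg (by omega : (0:Int) ≤ -n) (le_of_lt hs)
      nlinarith
    omega
  · have h1 : PySem.Int.floordiv (-m) s = PySem.Int.floordiv m (-s) := by
      have := PySem.Int.floordiv_neg_neg m (-s)
      simpa using this
    have hbr : (n - 1) * (-s) < -m ∧ -m ≤ n * (-s) := by
      have hpos : 0 < -s := by omega
      have : -(PySem.Int.floordiv (-(-m)) (-s)) = n := by
        simp only [neg_neg, ← h1, hn]
      exact (PySem.Int.neg_floordiv_neg_eq_iff_of_pos hpos).mp this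
    have hbr' : n * s ≤ m ∧ m < (n - 1) * s := by constructor <;> nlinarith [hbr.1, hbr.2]
    refine ⟨?_, fun h' => absurd hs (by omega), fun _ => hbr'⟩
    by_contra hc
    have : 0 ≤ n * s := by
      have := mul_nonneg (by omega : (0:Int) ≤ -n) (by omega : (0:Int) ≤ -s)
      nlinarith
    omega

-- A's bucket list (stepped range with its last element overwritten) in closed form
lemma bucket_list_eq (m s : Int) (h : (0 < s ∧ 0 < m) ∨ (s < 0 ∧ m < 0)) :
    (PySem.List.pyRange s (m + s) s).dropLast ++ [m]
      = (List.range (-(PySem.Int.floordiv (-m) s)).toNat).map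
          (fun k : Nat => if (k : Int) < -(PySem.Int.floordiv (-m) s) - 1 then ((k : Int) + 1) * s else m) := by
  set n := -(PySem.Int.floordiv (-m) s) with hn
  obtain ⟨hn1, hbrp, hbrn⟩ := ceil_bracket m s h
  -- the raw range is map (fun k => s + s*k) over range n.toNat
  have hrange : PySem.List.pyRange s (m + s) s
      = (List.range n.toNat).map (fun k : Nat => s + s * (k : Int)) := by
    rcases h with ⟨hs, hm⟩ | ⟨hs, hm⟩
    · obtain ⟨h1, h2⟩ := hbrp hs
      rw [PySem.List.pyRange_of_pos _ _ hs]
      have hlt : s < m + s := by omega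
      rw [if_pos hlt]
      have hq : (m + s - s + s - 1) / s = n := by
        have ha : n ≤ (m + s - s + s - 1) / s := by
          rw [Int.le_ediv_iff_mul_le hs]; nlinarith
        have hb : (m + s - s + s - 1) / s < n + 1 := by
          rw [Int.ediv_lt_iff_lt_mul hs]; nlinarith
        omega
      rw [hq]
    · obtain ⟨h1, h2⟩ := hbrn hs
      have hs0 : s ≠ 0 := by omega
      have hlt : m + s < s := by omega
      simp only [PySem.List.pyRange, if_neg hs0, if_neg (by omega : ¬ 0 < s), if_pos hlt]
      have hq : (s - (m + s) + -s - 1) / (-s) = n := by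
        have hpos : 0 < -s := by omega
        have ha : n ≤ (s - (m + s) + -s - 1) / (-s) := by
          rw [Int.le_ediv_iff_mul_le hpos]; nlinarith
        have hb : (s - (m + s) + -s - 1) / (-s) < n + 1 := by
          rw [Int.ediv_lt_iff_lt_mul hpos]; nlinarith
        omega
      rw [hq]
  rw [hrange]
  have hN : n.toNat = (n.toNat - 1) + 1 := by omega
  rw [hN, List.range_succ, List.map_append, List.map_append]
  simp only [List.map_cons, List.map_nil]
  rw [List.dropLast_concat]
  congr 1
  · apply List.map_congr_left
    intro k hk
    have hk' : k < n.toNat - 1 := List.mem_range.mp hk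
    rw [if_pos (by omega : (k : Int) < n - 1)]
    ring
  · rw [if_neg (by omega : ¬ ((n.toNat - 1 : Nat) : Int) < n - 1)]

-- clamped read of the closed-form list equals the closed form extended past the end
lemma clamped_read (n : Int) (hn : 1 ≤ n) (s m : Int) (i : Nat) :
    (((List.range n.toNat).map
        (fun k : Nat => if (k : Int) < n - 1 then ((k : Int) + 1) * s else m)).getD
      (min i (((List.range n.toNat).map
        (fun k : Nat => if (k : Int) < n - 1 then ((k : Int) + 1) * s else m)).length - 1)) 0)
    = (if (i : Int) < n - 1 then ((i : Int) + 1) * s else m) := by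
  have hlen : ((List.range n.toNat).map
      (fun k : Nat => if (k : Int) < n - 1 then ((k : Int) + 1) * s else m)).length = n.toNat := by simp
  rw [hlen]
  by_cases h : i < n.toNat - 1
  · have hmin : min i (n.toNat - 1) = i := by omega
    rw [hmin, List.getD_eq_getElem _ _ (by simp; omega), List.getElem_map, List.getElem_range]
  · have hmin : min i (n.toNat - 1) = n.toNat - 1 := by omega
    rw [hmin, List.getD_eq_getElem _ _ (by simp; omega), List.getElem_map, List.getElem_range]
    rw [if_neg (by omega : ¬ ((n.toNat - 1 : Nat) : Int) < n - 1),
        if_neg (by omega : ¬ ((i : Nat) : Int) < n - 1)]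

-- ===== VERDICT (by name: the statement is the Claim_ definition above) =====
theorem define_ctx_buckets_spec : Claim_equal_define_ctx_buckets := by
  intro m s cm cs _ hpre
  obtain ⟨hA, hB⟩ := hpre
  unfold Spec_define_ctx_buckets define_ctx_buckets define_ctx_buckets_alt
  simp only []
  set cmsl := cm.getD m with hcmsl
  set cstep := cs.getD s with hcstep
  set ns := -(PySem.Int.floordiv (-m) s) with hns
  set nc := -(PySem.Int.floordiv (-cmsl) cstep) with hnc
  have hns1 : 1 ≤ ns := (ceil_bracket m s hA).1
  have hnc1 : 1 ≤ nc := (ceil_bracket cmsl cstep hB).1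
  rw [pad_zip_eq _ _ (by simp) (by simp)]
  rw [bucket_list_eq m s hA, bucket_list_eq cmsl cstep hB]
  rw [PySem.List.pyRange_one]
  have hmax : ((max ns nc + 1 - 1)).toNat = max ns.toNat nc.toNat := by omega
  rw [List.map_map]
  have hlenmax :
      max ((List.range ns.toNat).map
            (fun k : Nat => if (k : Int) < ns - 1 then ((k : Int) + 1) * s else m)).length
          ((List.range nc.toNat).map
            (fun k : Nat => if (k : Int) < nc - 1 then ((k : Int) + 1) * cstep else cmsl)).length
        = max ns.toNat nc.toNat := by simp
  rw [hlenmax, hmax]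
  apply List.map_congr_left
  intro i _
  rw [clamped_read ns hns1 s m i, clamped_read nc hnc1 cstep cmsl i]
  simp only [Function.comp]
  simp only [Prod.mk.injEq]
  clear_value ns nc
  clear hns hnc hcmsl hcstep
  constructor <;> split_ifs <;> first | (exfalso; omega) | ring
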